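-- pv_equiv track=rewrite | github.com/Eirohir1/galaxy-geodesic-dynamics | experiments/all_py_snapshot/query_failures_hardcoded.py | pick_final
-- ===== SOURCE A (Python) =====
-- def pick_final(simbad, ned_cls, ned_type):
--     """Priority: SIMBAD->NED(Classifications)->NED(Type)->Unknown, but avoid returning bare 'G' if better exists."""
--     for val in (simbad, ned_cls, ned_type):
--         if val and val.strip() and val.lower() not in {"g", "galaxy"}:
--             return val
--     for val in (simbad, ned_cls, ned_type):
--         if val and val.strip():
--             return val
--     return "Unknown"
-- ===== SOURCE B (Python) =====
-- def pick_final(simbad, ned_cls, ned_type):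
--     """Single pass: return first good value, remembering first non-empty as fallback."""
--     fallback = None
--     for val in (simbad, ned_cls, ned_type):
--         if val and val.strip():
--             if val.lower() not in ("g", "galaxy"):
--                 return val
--             if fallback is None:
--                 fallback = val
--     return fallback if fallback is not None else "Unknown"
-- ===== Notes on version B (the rewrite author's own statement) =====
-- stated objective: simpler
-- what changed: Replaced A's two sequential scans over the triple with a single scan that returns the first non-'g'/'galaxy' non-blank value immediately and remembers the first non-blank value as a fallback.
import Mathlib
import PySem

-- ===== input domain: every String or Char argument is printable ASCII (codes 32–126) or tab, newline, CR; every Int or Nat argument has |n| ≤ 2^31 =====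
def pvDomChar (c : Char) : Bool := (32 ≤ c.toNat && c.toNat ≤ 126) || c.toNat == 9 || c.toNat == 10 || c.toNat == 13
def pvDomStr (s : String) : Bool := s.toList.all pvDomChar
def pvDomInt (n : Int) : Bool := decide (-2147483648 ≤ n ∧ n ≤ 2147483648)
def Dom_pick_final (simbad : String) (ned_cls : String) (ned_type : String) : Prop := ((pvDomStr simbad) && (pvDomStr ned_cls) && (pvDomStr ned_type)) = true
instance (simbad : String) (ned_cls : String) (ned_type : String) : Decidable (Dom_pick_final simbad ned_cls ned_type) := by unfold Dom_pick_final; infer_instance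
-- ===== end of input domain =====

-- B replaces A's two sequential scans with one scan that records the first non-empty
-- value as a fallback (objective: simpler, single pass).
-- ===== PORT A =====
-- 'val and val.strip() and val.lower() not in {"g","galaxy"}' for the first loop
def pickA_good (val : String) : Bool :=
  val != "" && PySem.Str.strip val != "" &&
    !(PySem.Str.lower val == "g" || PySem.Str.lower val == "galaxy")

-- 'val and val.strip()' for the second loop
def pickA_nonblank (val : String) : Bool :=
  val != "" && PySem.Str.strip val != ""

def pick_final (simbad : String) (ned_cls : String) (ned_type : String) : String :=
  -- first for-loop: return the first val passing the full test
  match [simbad, ned_cls, ned_type].find? pickA_good with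
  | some v => v
  | none =>
    -- second for-loop: return the first truthy, non-blank val
    match [simbad, ned_cls, ned_type].find? pickA_nonblank with
    | some v => v
    | none => "Unknown"

-- ===== PORT B =====
-- the single loop of Source B, carrying the fallback (None = Option.none)
def pickB_loop : List String → Option String → String
  | [], fallback => fallback.getD "Unknown"
  | val :: rest, fallback =>
    if val != "" && PySem.Str.strip val != "" then
      if !(PySem.Str.lower val == "g" || PySem.Str.lower val == "galaxy") then
        val
      else
        pickB_loop rest (if fallback.isNone then some val else fallback)
    else
      pickB_loop rest fallback

def pick_final_alt (simbad : String) (ned_cls : String) (ned_type : String) : String :=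
  pickB_loop [simbad, ned_cls, ned_type] none

-- ===== PRECONDITION & SPEC =====
def Spec_pick_final (simbad : String) (ned_cls : String) (ned_type : String) (out : String) : Prop := out = pick_final_alt simbad ned_cls ned_type
instance (simbad : String) (ned_cls : String) (ned_type : String) (out : String) : Decidable (Spec_pick_final simbad ned_cls ned_type out) := by unfold Spec_pick_final; infer_instance

-- ===== CLAIM (what is proved, stated in full; the proofs are below) =====
def Claim_equal_pick_final : Prop := ∀ (simbad : String) (ned_cls : String) (ned_type : String), Dom_pick_final simbad ned_cls ned_type → Spec_pick_final simbad ned_cls ned_type (pick_final simbad ned_cls ned_type)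

-- ===== LEMMAS AND PROOFS =====

-- ===== VERDICT (by name: the statement is the Claim_ definition above) =====
theorem pick_final_spec : Claim_equal_pick_final := by
  intro simbad ned_cls ned_type _
  unfold Spec_pick_final pick_final pick_final_alt
  simp only [List.find?, pickA_good, pickA_nonblank, pickB_loop]
  by_cases h1 : (simbad != "" && PySem.Str.strip simbad != "") = true <;>
  by_cases h2 : (ned_cls != "" && PySem.Str.strip ned_cls != "") = true <;>
  by_cases h3 : (ned_type != "" && PySem.Str.strip ned_type != "") = true <;>
  by_cases g1 : (PySem.Str.lower simbad == "g" || PySem.Str.lower simbad == "galaxy") = true <;>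
  by_cases g2 : (PySem.Str.lower ned_cls == "g" || PySem.Str.lower ned_cls == "galaxy") = true <;>
  by_cases g3 : (PySem.Str.lower ned_type == "g" || PySem.Str.lower ned_type == "galaxy") = true <;>
  simp [h1, h2, h3, g1, g2, g3]
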